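-- pv_equiv track=rewrite | github.com/luqmansen/data-structure-algorithm | graph/largest_component.py | explore_node
-- ===== SOURCE A (Python) =====
-- import typing
--
-- def explore_node(graph, node, visited: typing.Set) -> (bool, int):
--     # dfs search
--     if node in visited:
--         return False, 0
--
--     len_before = len(visited)
--
--     stack = [node]
--     while len(stack) > 0:
--         curr = stack.pop()
--         visited.add(curr)
--         for neighbor in graph[curr]:
--             if neighbor not in visited:
--                 stack.append(neighbor)
--
--     # if the number of visited node is increase after explore operation,
--     # means that those nodes aren't connected to prev graph
--     len_after = len(visited)
--     return len_before != len_after, len_after - len_before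
-- ===== SOURCE B (Python) =====
-- import typing
--
-- def explore_node(graph, node, visited: typing.Set) -> (bool, int):
--     # recursive dfs search (same in-place growth of `visited` as the original)
--     if node in visited:
--         return False, 0
--
--     len_before = len(visited)
--
--     def dfs(curr):
--         visited.add(curr)
--         for neighbor in graph[curr]:
--             if neighbor not in visited:
--                 dfs(neighbor)
--
--     dfs(node)
--
--     return len_before != len(visited), len(visited) - len_before
-- ===== Notes on version B (the rewrite author's own statement) =====
-- stated objective: alternative
-- what changed: The explicit stack loop is replaced by a recursive DFS helper (implicit call stack, neighbours explored first-to-last instead of last-to-first); the visited set and the returned tuple are identical.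
-- outside the precondition, e.g. on explore_node({'a': [], 'b': ['c']}, 'a', set()): A returns (True, 1), B returns (True, 1)
import Mathlib
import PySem

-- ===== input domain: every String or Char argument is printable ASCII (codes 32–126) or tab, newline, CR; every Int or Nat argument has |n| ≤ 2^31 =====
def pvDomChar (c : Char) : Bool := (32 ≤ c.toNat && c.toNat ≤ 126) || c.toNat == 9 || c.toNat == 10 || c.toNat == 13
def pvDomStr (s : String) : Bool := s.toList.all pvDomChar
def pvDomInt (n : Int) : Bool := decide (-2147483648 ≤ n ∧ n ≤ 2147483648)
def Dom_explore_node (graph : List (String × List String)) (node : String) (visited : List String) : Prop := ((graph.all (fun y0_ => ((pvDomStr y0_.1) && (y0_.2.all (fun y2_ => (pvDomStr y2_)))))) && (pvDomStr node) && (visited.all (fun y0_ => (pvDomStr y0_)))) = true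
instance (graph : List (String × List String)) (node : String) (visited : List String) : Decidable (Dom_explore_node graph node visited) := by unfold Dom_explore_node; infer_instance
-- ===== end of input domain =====

-- B changes the decomposition only: a recursive DFS helper replaces A's explicit stack loop
-- (same returned tuple; like A, the Python B grows `visited` in place — the equivalence proved
-- here is about the returned value).

-- Helpers shared by the two ports' TERMINATION arguments (cited in decreasing_by):
-- all strings occurring in the graph (keys and neighbours)
def pvAllS (g : List (String × List String)) : List String := g.flatMap (fun p => p.1 :: p.2)

-- count of graph strings not yet visited (the decreasing quantity of a DFS)
def pvCnt (g : List (String × List String)) (v : List String) : Nat :=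
  ((pvAllS g).toFinset \ v.toFinset).card

theorem pv_subset_add (v : List String) (x : String) : v ⊆ PySem.Set.add v x := by
  rw [PySem.Set.add_eq_ite]; split
  · exact fun a ha => ha
  · exact fun a ha => List.mem_append_left _ ha

theorem pv_get?_mem_pair (g : List (String × List String)) (k : String) (ns : List String)
    (h : (PySem.Dict.mk g).get? k = some ns) : (k, ns) ∈ g := by
  induction g with
  | nil => simp [PySem.Dict.get?] at h
  | cons p rest ih =>
    rcases p with ⟨a, b⟩
    rw [PySem.Dict.get?_mk_cons] at h
    by_cases hk : a = k
    · subst hk; simp at h; subst h; exact List.mem_cons_self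
    · simp [hk] at h
      exact List.mem_cons_of_mem _ (ih h)

theorem pv_mem_allS_fst (g : List (String × List String)) (k : String) (ns : List String)
    (h : (k, ns) ∈ g) : k ∈ pvAllS g := by
  unfold pvAllS
  exact List.mem_flatMap.mpr ⟨(k, ns), h, List.mem_cons_self⟩

theorem pv_len_le (g : List (String × List String)) (k : String) (ns : List String)
    (h : (k, ns) ∈ g) : ns.length ≤ (pvAllS g).length := by
  induction g with
  | nil => cases h
  | cons p rest ih =>
    rcases List.mem_cons.mp h with he | hm
    · subst he; simp [pvAllS, List.flatMap_cons]; omega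
    · have := ih hm
      simp [pvAllS, List.flatMap_cons] at *
      omega

theorem pvCnt_le_of_subset (g : List (String × List String)) {v w : List String}
    (h : v ⊆ w) : pvCnt g w ≤ pvCnt g v := by
  apply Finset.card_le_card
  intro a ha
  simp only [Finset.mem_sdiff, List.mem_toFinset] at *
  exact ⟨ha.1, fun hm => ha.2 (h hm)⟩

theorem pvCnt_add_lt (g : List (String × List String)) {v : List String} {x : String}
    (hx : x ∈ pvAllS g) (hv : x ∉ v) : pvCnt g (PySem.Set.add v x) < pvCnt g v := by
  rw [PySem.Set.add_of_not_mem hv]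
  unfold pvCnt
  apply Finset.card_lt_card
  rw [Finset.ssubset_def]
  constructor
  · intro a ha
    simp only [Finset.mem_sdiff, List.mem_toFinset, List.mem_append, List.mem_singleton] at *
    exact ⟨ha.1, fun hm => ha.2 (Or.inl hm)⟩
  · intro hsub
    have hx1 : x ∈ (pvAllS g).toFinset \ v.toFinset := by
      simp only [Finset.mem_sdiff, List.mem_toFinset]; exact ⟨hx, hv⟩
    have := hsub hx1
    simp at this

-- `for neighbor in graph[curr]: if neighbor not in visited: stack.append(neighbor)`
-- pushes exactly the not-yet-visited neighbours, last one on top: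
theorem pv_pushes_eq (v' rest ns : List String) :
    ns.foldl (fun st n => if n ∈ v' then st else n :: st) rest
      = (ns.filter (fun n => !decide (n ∈ v'))).reverse ++ rest := by
  induction ns generalizing rest with
  | nil => simp
  | cons n ns ih =>
    by_cases hn : n ∈ v' <;> simp [List.foldl_cons, hn, ih]

-- ===== PORT A =====
-- the `while len(stack) > 0` loop of A (stack top = list head; pushes keep Python's pop order)
def exploreLoop (g : List (String × List String)) (v : List String) (s : List String) :
    List String :=
  match s with
  | [] => v
  | curr :: rest =>
    let v' := PySem.Set.add v curr
    match h : (PySem.Dict.mk g).get? curr with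
    | none => v'      -- graph[curr] raises KeyError here: outside Pre_
    | some ns => exploreLoop g v' (ns.foldl (fun st n => if n ∈ v' then st else n :: st) rest)
termination_by (pvCnt g v, (s.filter (fun x => decide (x ∈ v))).length)
decreasing_by
  by_cases hcv : curr ∈ v
  · simp only [PySem.Set.add_of_mem hcv]
    apply Prod.Lex.right
    simp only [dite_eq_ite]
    rw [pv_pushes_eq, List.filter_append, List.filter_reverse, List.filter_filter]
    simp [hcv, Bool.and_not_self]
  · have hp := pv_get?_mem_pair g curr ns h
    exact Prod.Lex.left _ _ (pvCnt_add_lt g (pv_mem_allS_fst g curr ns hp) hcv)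

def explore_node (graph : List (String × List String)) (node : String) (visited : List String) :
    Bool × Int :=
  if node ∈ visited then (false, 0)
  else
    let lenBefore : Int := visited.length
    let final := exploreLoop graph visited [node]
    let lenAfter : Int := final.length
    (decide (lenBefore ≠ lenAfter), lenAfter - lenBefore)

-- ===== PORT B =====
-- the recursive `dfs(curr)` of B and its `for neighbor in graph[curr]` loop; `visited` is
-- threaded through (the subtype keeps the monotonicity fact the termination measure needs)
mutual
def dfsB (g : List (String × List String)) (v : List String) (curr : String)
    (hc : curr ∉ v) : {w : List String // v ⊆ w} :=
  let v' := PySem.Set.add v curr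
  match h : (PySem.Dict.mk g).get? curr with
  | none => ⟨v', pv_subset_add v curr⟩      -- graph[curr] raises KeyError here: outside Pre_
  | some ns => ⟨(goB g v' ns).val, fun a ha => (goB g v' ns).property (pv_subset_add v curr ha)⟩
termination_by pvCnt g v * ((pvAllS g).length + 2)
decreasing_by
  have hp := pv_get?_mem_pair g curr ns h
  have h1 : pvCnt g (PySem.Set.add v curr) < pvCnt g v :=
    pvCnt_add_lt g (pv_mem_allS_fst g curr ns hp) hc
  have h2 : ns.length ≤ (pvAllS g).length := pv_len_le g curr ns hp
  have h4 : (pvCnt g (PySem.Set.add v curr) + 1) * ((pvAllS g).length + 2)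
      ≤ pvCnt g v * ((pvAllS g).length + 2) := Nat.mul_le_mul_right _ h1
  have h5 : (pvCnt g (PySem.Set.add v curr) + 1) * ((pvAllS g).length + 2)
      = pvCnt g (PySem.Set.add v curr) * ((pvAllS g).length + 2) + ((pvAllS g).length + 2) := by
    ring
  rw [h5] at h4
  omega

def goB (g : List (String × List String)) (v : List String) (ns : List String) :
    {w : List String // v ⊆ w} :=
  match ns with
  | [] => ⟨v, fun _ h => h⟩
  | n :: rest =>
    if hn : n ∈ v then goB g v rest
    else
      ⟨(goB g (dfsB g v n hn).val rest).val,
        fun a ha => (goB g (dfsB g v n hn).val rest).property ((dfsB g v n hn).property ha)⟩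
termination_by pvCnt g v * ((pvAllS g).length + 2) + ns.length + 1
decreasing_by
  · simp only [List.length_cons]; omega
  · simp only [List.length_cons]; omega
  · have key : ∀ (t : {w : List String // v ⊆ w}),
        pvCnt g t.val * ((pvAllS g).length + 2) + rest.length + 1
          < pvCnt g v * ((pvAllS g).length + 2) + (n :: rest).length + 1 := by
      intro t
      have h1 : pvCnt g t.val ≤ pvCnt g v := pvCnt_le_of_subset g t.property
      have h2 := Nat.mul_le_mul_right ((pvAllS g).length + 2) h1
      simp only [List.length_cons]
      omega
    exact key _
end

def explore_node_alt (graph : List (String × List String)) (node : String)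
    (visited : List String) : Bool × Int :=
  if hn : node ∈ visited then (false, 0)
  else
    let lenBefore : Int := visited.length
    let final := (dfsB graph visited node hn).val
    (decide (lenBefore ≠ (final.length : Int)), (final.length : Int) - lenBefore)

-- ===== PRECONDITION & SPEC =====
-- Pre_ excludes (a) duplicate keys in the association list, where the Python dict's
-- last-key-wins behaviour is not what an association-list model can promise, (b) a duplicated
-- element in `visited`, which cannot arise from a Python set, and (c) — unless node ∈ visited —
-- inputs where `node` is not a key or some neighbour is neither a key nor initially visited:
-- on such inputs A may raise KeyError (the closure condition is sufficient for no KeyError and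
-- slightly wider than exact: it also excludes some inputs whose bad neighbours A never reaches).
def Pre_explore_node (graph : List (String × List String)) (node : String)
    (visited : List String) : Prop :=
  (graph.map Prod.fst).Nodup ∧ visited.Nodup ∧
    (node ∈ visited ∨
      (node ∈ graph.map Prod.fst ∧
        ∀ p ∈ graph, ∀ n ∈ p.2, n ∈ graph.map Prod.fst ∨ n ∈ visited))
instance (graph : List (String × List String)) (node : String) (visited : List String) :
    Decidable (Pre_explore_node graph node visited) := by unfold Pre_explore_node; infer_instance

def pvWitness_explore_node : (List (String × List String)) × String × List String :=
  ([("a", ["b", "c"]), ("b", []), ("c", ["a"])], "a", ["d"])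

def Spec_explore_node (graph : List (String × List String)) (node : String)
    (visited : List String) (out : Bool × Int) : Prop := out = explore_node_alt graph node visited
instance (graph : List (String × List String)) (node : String) (visited : List String)
    (out : Bool × Int) : Decidable (Spec_explore_node graph node visited out) := by
  unfold Spec_explore_node; infer_instance

-- ===== CLAIM (what is proved, stated in full; the proofs are below) =====
def Claim_equal_explore_node : Prop := ∀ (graph : List (String × List String)) (node : String) (visited : List String), Dom_explore_node graph node visited → Pre_explore_node graph node visited → Spec_explore_node graph node visited (explore_node graph node visited)

-- ===== LEMMAS AND PROOFS =====

-- adjacency of x (empty when x is not a key)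
def pvAdj (g : List (String × List String)) (x : String) : List String :=
  ((PySem.Dict.mk g).get? x).getD []

-- strings reachable from a start in `s` through edges of `g`, never entering `v`
inductive Rch (g : List (String × List String)) (v : List String) : List String → String → Prop
  | start {s : List String} {x : String} (hx : x ∈ s) (hv : x ∉ v) : Rch g v s x
  | step {s : List String} {x y : String} (hx : Rch g v s x) (hy : y ∈ pvAdj g x)
      (hyv : y ∉ v) : Rch g v s y

theorem Rch_not_mem {g : List (String × List String)} {v s : List String} {x : String}
    (h : Rch g v s x) : x ∉ v := by
  cases h with
  | start _ hv => exact hv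
  | step _ _ hyv => exact hyv

theorem Rch_mono_start {g : List (String × List String)} {v s s' : List String} {x : String}
    (hss : ∀ y, y ∈ s → y ∉ v → y ∈ s') (h : Rch g v s x) : Rch g v s' x := by
  induction h with
  | start hx hv => exact Rch.start (hss _ hx hv) hv
  | step _ hy hyv ih => exact Rch.step ih hy hyv

theorem Rch_nil {g : List (String × List String)} {v : List String} {x : String}
    (h : Rch g v [] x) : False := by
  induction h with
  | start hx _ => cases hx
  | step _ _ _ ih => exact ih

-- the DFS step: visiting a fresh `c` and replacing it by its unvisited neighbours
theorem crux {g : List (String × List String)} {v : List String} {c : String}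
    {rest s' : List String} (hc : c ∉ v)
    (hs' : ∀ n, (n ∈ s' ∧ n ∉ v ++ [c]) ↔ ((n ∈ pvAdj g c ∨ n ∈ rest) ∧ n ∉ v ++ [c])) :
    ∀ x, (x ∈ v ∨ Rch g v (c :: rest) x) ↔ (x ∈ v ++ [c] ∨ Rch g (v ++ [c]) s' x) := by
  intro x
  constructor
  · rintro (hx | hr)
    · exact Or.inl (List.mem_append_left _ hx)
    · induction hr with
      | start hx hvx =>
        rename_i z
        rcases List.mem_cons.mp hx with hz | hz
        · exact Or.inl (by simp [hz])
        · by_cases hzv' : z ∈ v ++ [c]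
          · exact Or.inl hzv'
          · exact Or.inr (Rch.start ((hs' z).mpr ⟨Or.inr hz, hzv'⟩).1 hzv')
      | step hx hy hyv ih =>
        rename_i x' y
        by_cases hyv' : y ∈ v ++ [c]
        · exact Or.inl hyv'
        · rcases ih with hx' | hx'
          · rcases List.mem_append.mp hx' with hx'' | hx''
            · exact absurd hx'' (Rch_not_mem hx)
            · have hxc : x' = c := by simpa using hx''
              subst hxc
              exact Or.inr (Rch.start ((hs' y).mpr ⟨Or.inl hy, hyv'⟩).1 hyv')
          · exact Or.inr (Rch.step hx' hy hyv')
  · rintro (hx | hr)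
    · rcases List.mem_append.mp hx with hx' | hx'
      · exact Or.inl hx'
      · have hxc : x = c := by simpa using hx'
        subst hxc
        exact Or.inr (Rch.start List.mem_cons_self hc)
    · induction hr with
      | start hx hvx =>
        rename_i z
        have hzv : z ∉ v := fun hm => hvx (List.mem_append_left _ hm)
        rcases ((hs' z).mp ⟨hx, hvx⟩).1 with hz | hz
        · exact Or.inr (Rch.step (Rch.start List.mem_cons_self hc) hz hzv)
        · exact Or.inr (Rch.start (List.mem_cons_of_mem _ hz) hzv)
      | step hx hy hyv ih =>
        rename_i x' y
        have hyv2 : y ∉ v := fun hm => hyv (List.mem_append_left _ hm)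
        rcases ih with hx' | hx'
        · exact absurd (List.mem_append_left _ hx') (Rch_not_mem hx)
        · exact Or.inr (Rch.step hx' hy hyv2)

-- a duplicate pop: `c` already visited and all its neighbours visited or still on the stack
theorem crux_dup {g : List (String × List String)} {v : List String} {c : String}
    {rest s' : List String} (hc : c ∈ v)
    (hadj : ∀ y ∈ pvAdj g c, y ∈ v ∨ y ∈ rest)
    (hs' : ∀ n, (n ∈ s' ∧ n ∉ v) ↔ ((n ∈ pvAdj g c ∨ n ∈ rest) ∧ n ∉ v)) :
    ∀ x, (x ∈ v ∨ Rch g v (c :: rest) x) ↔ (x ∈ v ∨ Rch g v s' x) := by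
  intro x
  constructor
  · rintro (hx | hr)
    · exact Or.inl hx
    · refine Or.inr (Rch_mono_start ?_ hr)
      intro y hy hyv
      rcases List.mem_cons.mp hy with hz | hz
      · exact absurd (hz ▸ hc) hyv
      · exact ((hs' y).mpr ⟨Or.inr hz, hyv⟩).1
  · rintro (hx | hr)
    · exact Or.inl hx
    · refine Or.inr (Rch_mono_start ?_ hr)
      intro y hy hyv
      rcases ((hs' y).mp ⟨hy, hyv⟩).1 with hz | hz
      · rcases hadj y hz with hv | hv
        · exact absurd hv hyv
        · exact List.mem_cons_of_mem _ hv
      · exact List.mem_cons_of_mem _ hz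

-- growing the visited set by the closure of one start keeps the overall closure
theorem grow {g : List (String × List String)} {v w : List String} {n : String}
    {rest : List String} (hn : n ∉ v) (hw : ∀ z, z ∈ w ↔ (z ∈ v ∨ Rch g v [n] z)) :
    ∀ x, (x ∈ v ∨ Rch g v (n :: rest) x) ↔ (x ∈ w ∨ Rch g w rest x) := by
  have hvw : ∀ z, z ∈ v → z ∈ w := fun z hz => (hw z).mpr (Or.inl hz)
  intro x
  constructor
  · rintro (hx | hr)
    · exact Or.inl (hvw _ hx)
    · induction hr with
      | start hx hvx =>
        rename_i z
        rcases List.mem_cons.mp hx with hz | hz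
        · exact Or.inl ((hw z).mpr (Or.inr (Rch.start (by simp [hz]) hvx)))
        · by_cases hzw : z ∈ w
          · exact Or.inl hzw
          · exact Or.inr (Rch.start hz hzw)
      | step hx hy hyv ih =>
        rename_i x' y
        by_cases hyw : y ∈ w
        · exact Or.inl hyw
        · rcases ih with hx' | hx'
          · rcases (hw x').mp hx' with hxv | hxr
            · exact absurd hxv (Rch_not_mem hx)
            · exact absurd ((hw y).mpr (Or.inr (Rch.step hxr hy hyv))) hyw
          · exact Or.inr (Rch.step hx' hy hyw)
  · rintro (hx | hr)
    · rcases (hw x).mp hx with hxv | hxr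
      · exact Or.inl hxv
      · refine Or.inr (Rch_mono_start ?_ hxr)
        intro y hy hyv
        simp only [List.mem_singleton] at hy
        simp [hy]
    · induction hr with
      | start hx hvx =>
        rename_i z
        exact Or.inr (Rch.start (List.mem_cons_of_mem _ hx) (fun hm => hvx (hvw _ hm)))
      | step hx hy hyv ih =>
        rename_i x' y
        have hyv2 : y ∉ v := fun hm => hyv (hvw _ hm)
        rcases ih with hx' | hx'
        · exact absurd (hvw _ hx') (Rch_not_mem hx)
        · exact Or.inr (Rch.step hx' hy hyv2)

theorem loopA_char (g : List (String × List String)) (v0 : List String)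
    (hcl : ∀ p ∈ g, ∀ n ∈ p.2, n ∈ g.map Prod.fst ∨ n ∈ v0) :
    ∀ v s, (∀ x ∈ v0, x ∈ v) → (∀ x ∈ s, x ∈ g.map Prod.fst) → (∀ x ∈ s, x ∉ v0) →
      (∀ x ∈ v, x ∉ v0 → ∀ y ∈ pvAdj g x, y ∈ v ∨ y ∈ s) →
      (∀ x, x ∈ exploreLoop g v s ↔ x ∈ v ∨ Rch g v s x) ∧
        (v.Nodup → (exploreLoop g v s).Nodup) := by
  intro v s
  fun_induction exploreLoop g v s with
  | case1 v =>
    intro _ _ _ _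
    refine ⟨fun x => ⟨Or.inl, ?_⟩, fun h => h⟩
    rintro (hx | hr)
    · exact hx
    · exact (Rch_nil hr).elim
  | case2 v curr rest v' h =>
    intro _ hsk _ _
    have hk := hsk curr List.mem_cons_self
    rw [PySem.Dict.get?_eq_none_iff_not_mem_keys] at h
    have h2 : curr ∉ List.map Prod.fst g := by simpa [PySem.Dict.keys] using h
    exact absurd hk h2
  | case3 v curr rest v' ns h ih =>
    intro hv0 hsk hs0 hinv
    simp only [dite_eq_ite] at ih ⊢
    simp only [v'] at ih ⊢
    rw [pv_pushes_eq] at ih ⊢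
    have hstack : ∀ x, x ∈ (ns.filter (fun n => !decide (n ∈ PySem.Set.add v curr))).reverse
        ++ rest ↔ (x ∈ ns ∧ x ∉ PySem.Set.add v curr) ∨ x ∈ rest := by
      intro x; simp [List.mem_filter]
    have hadjc : pvAdj g curr = ns := by simp [pvAdj, h]
    have hp : (curr, ns) ∈ g := pv_get?_mem_pair g curr ns h
    have hvsub : ∀ x ∈ v, x ∈ PySem.Set.add v curr := fun x hx => pv_subset_add v curr hx
    have hmemv' : ∀ x, x ∈ PySem.Set.add v curr ↔ x ∈ v ∨ x = curr := fun x =>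
      PySem.Set.mem_add v curr x
    have h1 : ∀ x ∈ v0, x ∈ PySem.Set.add v curr := fun x hx => hvsub x (hv0 x hx)
    have h2 : ∀ x ∈ (ns.filter (fun n => !decide (n ∈ PySem.Set.add v curr))).reverse ++ rest,
        x ∈ List.map Prod.fst g := by
      intro x hx
      rcases (hstack x).mp hx with ⟨hxn, hxv'⟩ | hxr
      · rcases hcl (curr, ns) hp x hxn with hk | hv0x
        · exact hk
        · exact absurd (hvsub _ (hv0 _ hv0x)) hxv'
      · exact hsk x (List.mem_cons_of_mem _ hxr)
    have h3 : ∀ x ∈ (ns.filter (fun n => !decide (n ∈ PySem.Set.add v curr))).reverse ++ rest,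
        x ∉ v0 := by
      intro x hx
      rcases (hstack x).mp hx with ⟨hxn, hxv'⟩ | hxr
      · exact fun hv0x => hxv' (hvsub _ (hv0 _ hv0x))
      · exact hs0 x (List.mem_cons_of_mem _ hxr)
    have h4 : ∀ x ∈ PySem.Set.add v curr, x ∉ v0 → ∀ y ∈ pvAdj g x,
        y ∈ PySem.Set.add v curr ∨
          y ∈ (ns.filter (fun n => !decide (n ∈ PySem.Set.add v curr))).reverse ++ rest := by
      intro x hx hxv0 y hy
      rcases (hmemv' x).mp hx with hxv | hxc
      · rcases hinv x hxv hxv0 y hy with hyv | hyr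
        · exact Or.inl (hvsub _ hyv)
        · rcases List.mem_cons.mp hyr with hyc | hyr'
          · exact Or.inl ((hmemv' y).mpr (Or.inr hyc))
          · exact Or.inr ((hstack y).mpr (Or.inr hyr'))
      · rw [hxc] at hy
        rw [hadjc] at hy
        by_cases hyv' : y ∈ PySem.Set.add v curr
        · exact Or.inl hyv'
        · exact Or.inr ((hstack y).mpr (Or.inl ⟨hy, hyv'⟩))
    obtain ⟨ihm, ihn⟩ := ih h1 h2 h3 h4
    constructor
    · intro x
      rw [ihm x]
      by_cases hcv : curr ∈ v
      · rw [PySem.Set.add_of_mem hcv] at *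
        have hadj : ∀ y ∈ pvAdj g curr, y ∈ v ∨ y ∈ rest := by
          intro y hy
          rcases hinv curr hcv (hs0 curr List.mem_cons_self) y hy with hyv | hyr
          · exact Or.inl hyv
          · rcases List.mem_cons.mp hyr with hyc | hyr'
            · exact Or.inl (hyc ▸ hcv)
            · exact Or.inr hyr'
        have hs' : ∀ n, (n ∈ (ns.filter (fun n => !decide (n ∈ v))).reverse ++ rest ∧ n ∉ v)
            ↔ ((n ∈ pvAdj g curr ∨ n ∈ rest) ∧ n ∉ v) := by
          intro n; rw [hadjc]
          constructor
          · rintro ⟨hn, hnv⟩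
            rcases (hstack n).mp hn with ⟨ha, _⟩ | hb
            · exact ⟨Or.inl ha, hnv⟩
            · exact ⟨Or.inr hb, hnv⟩
          · rintro ⟨hn, hnv⟩
            rcases hn with ha | hb
            · exact ⟨(hstack n).mpr (Or.inl ⟨ha, hnv⟩), hnv⟩
            · exact ⟨(hstack n).mpr (Or.inr hb), hnv⟩
        exact (crux_dup hcv hadj hs' x).symm
      · rw [PySem.Set.add_of_not_mem hcv] at *
        have hs' : ∀ n, (n ∈ (ns.filter (fun n => !decide (n ∈ v ++ [curr]))).reverse ++ rest
            ∧ n ∉ v ++ [curr]) ↔ ((n ∈ pvAdj g curr ∨ n ∈ rest) ∧ n ∉ v ++ [curr]) := by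
          intro n; rw [hadjc]
          constructor
          · rintro ⟨hn, hnv⟩
            rcases (hstack n).mp hn with ⟨ha, _⟩ | hb
            · exact ⟨Or.inl ha, hnv⟩
            · exact ⟨Or.inr hb, hnv⟩
          · rintro ⟨hn, hnv⟩
            rcases hn with ha | hb
            · exact ⟨(hstack n).mpr (Or.inl ⟨ha, hnv⟩), hnv⟩
            · exact ⟨(hstack n).mpr (Or.inr hb), hnv⟩
        exact (crux hcv hs' x).symm
    · intro hnd
      exact ihn (PySem.Set.nodup_add v curr hnd)

theorem Rch_single {g : List (String × List String)} {v : List String} {c x : String}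
    (hadj : pvAdj g c = []) (hc : c ∉ v) : Rch g v [c] x ↔ x = c := by
  constructor
  · intro h
    induction h with
    | start hx hv =>
      rename_i z
      simpa using hx
    | step hx hy hyv ih =>
      rename_i x' y
      rw [ih, hadj] at hy
      cases hy
  · intro h
    rw [h]
    exact Rch.start List.mem_cons_self hc

theorem BG_char (g : List (String × List String)) :
    ∀ (N : ℕ),
      (∀ (v : List String) (curr : String) (hc : curr ∉ v),
        pvCnt g v * ((pvAllS g).length + 2) < N →
          (∀ x, x ∈ (dfsB g v curr hc).val ↔ x ∈ v ∨ Rch g v [curr] x) ∧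
            (v.Nodup → (dfsB g v curr hc).val.Nodup)) ∧
      (∀ (v ns : List String),
        pvCnt g v * ((pvAllS g).length + 2) + ns.length + 1 < N →
          (∀ x, x ∈ (goB g v ns).val ↔ x ∈ v ∨ Rch g v ns x) ∧
            (v.Nodup → (goB g v ns).val.Nodup)) := by
  intro N
  induction N with
  | zero =>
    exact ⟨fun v c hc h => absurd h (Nat.not_lt_zero _),
           fun v ns h => absurd h (Nat.not_lt_zero _)⟩
  | succ N ihN =>
    constructor
    · intro v curr hc hlt
      rw [dfsB.eq_def]
      cases hg : (PySem.Dict.mk g).get? curr with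
      | none =>
        have hadj : pvAdj g curr = [] := by simp [pvAdj, hg]
        constructor
        · intro x
          rw [PySem.Set.mem_add v curr x, Rch_single hadj hc]
        · intro hnd
          exact PySem.Set.nodup_add v curr hnd
      | some ns =>
        have hp : (curr, ns) ∈ g := pv_get?_mem_pair g curr ns hg
        have hadjc : pvAdj g curr = ns := by simp [pvAdj, hg]
        have h1 : pvCnt g (PySem.Set.add v curr) < pvCnt g v :=
          pvCnt_add_lt g (pv_mem_allS_fst g curr ns hp) hc
        have h2 : ns.length ≤ (pvAllS g).length := pv_len_le g curr ns hp
        have h4 : (pvCnt g (PySem.Set.add v curr) + 1) * ((pvAllS g).length + 2)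
            ≤ pvCnt g v * ((pvAllS g).length + 2) := Nat.mul_le_mul_right _ h1
        have h5 : (pvCnt g (PySem.Set.add v curr) + 1) * ((pvAllS g).length + 2)
            = pvCnt g (PySem.Set.add v curr) * ((pvAllS g).length + 2)
              + ((pvAllS g).length + 2) := by ring
        rw [h5] at h4
        have hgo := ihN.2 (PySem.Set.add v curr) ns (by omega)
        have hadd : PySem.Set.add v curr = v ++ [curr] := PySem.Set.add_of_not_mem hc
        have hs' : ∀ n, (n ∈ ns ∧ n ∉ v ++ [curr])
            ↔ ((n ∈ pvAdj g curr ∨ n ∈ ([] : List String)) ∧ n ∉ v ++ [curr]) := by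
          intro n; rw [hadjc]; simp
        constructor
        · intro x
          rw [hgo.1 x, hadd]
          exact (crux hc hs' x).symm

        · intro hnd
          exact hgo.2 (PySem.Set.nodup_add v curr hnd)
    · intro v ns hlt
      rw [goB.eq_def]
      cases ns with
      | nil =>
        refine ⟨fun x => ⟨Or.inl, ?_⟩, fun h => h⟩
        rintro (hx | hr)
        · exact hx
        · exact (Rch_nil hr).elim
      | cons n rest =>
        simp only [List.length_cons] at hlt
        by_cases hn : n ∈ v
        · simp only [dif_pos hn]
          have hgo := ihN.2 v rest (by omega)
          constructor
          · intro x
            rw [hgo.1 x]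
            constructor
            · rintro (hx | hr)
              · exact Or.inl hx
              · exact Or.inr (Rch_mono_start
                  (fun y hy hyv => List.mem_cons_of_mem _ hy) hr)
            · rintro (hx | hr)
              · exact Or.inl hx
              · refine Or.inr (Rch_mono_start ?_ hr)
                intro y hy hyv
                rcases List.mem_cons.mp hy with hz | hz
                · exact absurd (hz ▸ hn) hyv
                · exact hz
          · exact hgo.2
        · simp only [dif_neg hn]
          have hdfs := ihN.1 v n hn (by omega)
          have hw : pvCnt g (dfsB g v n hn).val ≤ pvCnt g v :=
            pvCnt_le_of_subset g (dfsB g v n hn).property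
          have hw2 := Nat.mul_le_mul_right ((pvAllS g).length + 2) hw
          have hgo := ihN.2 (dfsB g v n hn).val rest (by omega)
          constructor
          · intro x
            rw [hgo.1 x]
            exact (grow hn hdfs.1 x).symm
          · intro hnd
            exact hgo.2 (hdfs.2 hnd)

theorem B_char (g : List (String × List String)) :
    ∀ (v : List String) (curr : String) (hc : curr ∉ v),
      (∀ x, x ∈ (dfsB g v curr hc).val ↔ x ∈ v ∨ Rch g v [curr] x) ∧
        (v.Nodup → (dfsB g v curr hc).val.Nodup) := by
  intro v curr hc
  exact (BG_char g (pvCnt g v * ((pvAllS g).length + 2) + 1)).1 v curr hc (Nat.lt_succ_self _)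

-- ===== VERDICT (by name: the statement is the Claim_ definition above) =====
theorem explore_node_spec : Claim_equal_explore_node := by
  intro g node v _hdom hpre
  obtain ⟨hknd, hvnd, hdisj⟩ := hpre
  unfold Spec_explore_node explore_node explore_node_alt
  by_cases hn : node ∈ v
  · simp [hn]
  · simp only [if_neg hn, dif_neg hn]
    rcases hdisj with hmem | ⟨hkey, hcl⟩
    · exact absurd hmem hn
    have hA := loopA_char g v hcl v [node] (fun x hx => hx)
      (by intro x hx; simp only [List.mem_singleton] at hx; rw [hx]; exact hkey)
      (by intro x hx; simp only [List.mem_singleton] at hx; rw [hx]; exact hn)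
      (by intro x hx hxv; exact absurd hx hxv)
    have hB := B_char g v node hn
    have hndA := hA.2 hvnd
    have hndB := hB.2 hvnd
    have hsame : ∀ x, x ∈ exploreLoop g v [node] ↔ x ∈ (dfsB g v node hn).val :=
      fun x => (hA.1 x).trans ((hB.1 x).symm)
    have hlen : (exploreLoop g v [node]).length = (dfsB g v node hn).val.length :=
      ((List.perm_ext_iff_of_nodup hndA hndB).mpr hsame).length_eq
    simp only [hlen]
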